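-- pv_equiv track=rewrite | github.com/SaturnFromTitan/advent_of_code | day08_treetop_tree_house/part1.py | check_horizontally
-- ===== SOURCE A (Python) =====
-- Location = tuple[int, int]
--
-- def check_horizontally(heights: list[int], row_index: int, from_left: bool) -> set[Location]:
--     row_length = len(heights)
--     if not from_left:
--         heights = reversed(heights)
--
--     visibles: set[Location] = set()
--     line_max_from_left = -1
--     for col_index, tree_height in enumerate(heights):
--         if not from_left:
--             col_index = row_length - col_index - 1
--
--         if tree_height > line_max_from_left:
--             line_max_from_left = tree_height
--             visibles.add((row_index, col_index))
--     return visibles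
-- ===== SOURCE B (Python) =====
-- def check_horizontally(heights, row_index, from_left):
--     row_length = len(heights)
--     hs = heights if from_left else heights[::-1]
--     # pass 1: exclusive prefix maxima in scan order (entry i = max of hs[:i], -1 for i == 0)
--     prefix_maxes = []
--     m = -1
--     for h in hs:
--         prefix_maxes.append(m)
--         m = max(m, h)
--     # pass 2: a tree is visible iff strictly taller than everything before it
--     return {
--         (row_index, i if from_left else row_length - i - 1)
--         for i, (h, p) in enumerate(zip(hs, prefix_maxes))
--         if h > p
--     }
-- ===== Notes on version B (the rewrite author's own statement) =====
-- stated objective: alternative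
-- what changed: Replaces A's single stateful scan (running max + set.add inside the loop) with two separate passes: first materialize an exclusive prefix-maximum table, then a set comprehension selects positions whose height strictly exceeds the prefix max.
import Mathlib
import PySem

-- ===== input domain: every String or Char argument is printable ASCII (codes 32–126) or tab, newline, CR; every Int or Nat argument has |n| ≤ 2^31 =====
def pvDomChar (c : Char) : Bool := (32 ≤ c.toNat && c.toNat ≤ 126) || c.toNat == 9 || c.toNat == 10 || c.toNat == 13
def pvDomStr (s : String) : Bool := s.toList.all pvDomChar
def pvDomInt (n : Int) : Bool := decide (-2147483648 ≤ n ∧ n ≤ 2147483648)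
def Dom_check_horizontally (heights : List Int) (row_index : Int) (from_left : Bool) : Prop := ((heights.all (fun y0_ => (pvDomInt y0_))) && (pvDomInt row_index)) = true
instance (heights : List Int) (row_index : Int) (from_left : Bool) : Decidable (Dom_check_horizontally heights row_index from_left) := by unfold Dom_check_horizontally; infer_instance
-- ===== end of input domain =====

-- B replaces A's single stateful scan by a materialized exclusive prefix-max table plus a
-- selection pass (same O(n) cost, different decomposition); return value equivalence only.

-- ===== PORT A =====
-- Python A: running max, add (row_index, col) to the set whenever the tree beats it.
def check_horizontally (heights : List Int) (row_index : Int) (from_left : Bool) : List (Int × Int) :=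
  let row_length : Int := heights.length
  let hs := if from_left then heights else heights.reverse
  let r := (PySem.List.enumerate hs 0).foldl
    (fun (st : PySem.Set (Int × Int) × Int) p =>
      let col_index := if from_left then p.1 else row_length - p.1 - 1
      if p.2 > st.2 then (PySem.Set.add st.1 (row_index, col_index), p.2) else st)
    (PySem.Set.empty, -1)
  r.1

-- ===== PORT B =====
-- pass 1 of Source B: the exclusive prefix maxima of the scanned row, seeded with -1
def prefixMaxes : Int → List Int → List Int
  | _, [] => []
  | m, h :: t => m :: prefixMaxes (max m h) t

def check_horizontally_alt (heights : List Int) (row_index : Int) (from_left : Bool) : List (Int × Int) :=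
  let row_length : Int := heights.length
  let hs := if from_left then heights else heights.reverse
  let prefix_maxes := prefixMaxes (-1) hs
  PySem.Set.ofList ((PySem.List.enumerate (hs.zip prefix_maxes) 0).filterMap
    (fun p => if p.2.1 > p.2.2 then
        some (row_index, if from_left then p.1 else row_length - p.1 - 1)
      else none))

-- ===== PRECONDITION & SPEC =====
def Spec_check_horizontally (heights : List Int) (row_index : Int) (from_left : Bool) (out : List (Int × Int)) : Prop := out = check_horizontally_alt heights row_index from_left
instance (heights : List Int) (row_index : Int) (from_left : Bool) (out : List (Int × Int)) : Decidable (Spec_check_horizontally heights row_index from_left out) := by unfold Spec_check_horizontally; infer_instance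

-- ===== CLAIM (what is proved, stated in full; the proofs are below) =====
def Claim_equal_check_horizontally : Prop := ∀ (heights : List Int) (row_index : Int) (from_left : Bool), Dom_check_horizontally heights row_index from_left → Spec_check_horizontally heights row_index from_left (check_horizontally heights row_index from_left)

-- ===== LEMMAS AND PROOFS =====

-- A's loop from state (acc, m) equals acc ++ B's selection over the prefix-max table,
-- for any injective column map g, provided acc holds no pair with a still-to-come column.
lemma ch_loop_eq (row_index : Int) (g : Int → Int) (hg : Function.Injective g)
    (hs : List Int) :
    ∀ (s m : Int) (acc : List (Int × Int)),
      (∀ i : Int, s ≤ i → (row_index, g i) ∉ acc) →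
      ((PySem.List.enumerate hs s).foldl
        (fun (st : PySem.Set (Int × Int) × Int) p =>
          if p.2 > st.2 then (PySem.Set.add st.1 (row_index, g p.1), p.2) else st)
        (acc, m)).1
      = acc ++ (PySem.List.enumerate (hs.zip (prefixMaxes m hs)) s).filterMap
          (fun p => if p.2.1 > p.2.2 then some (row_index, g p.1) else none) := by
  induction hs with
  | nil => intro s m acc _; simp [PySem.List.enumerate_nil, prefixMaxes]
  | cons h t ih =>
    intro s m acc hacc
    rw [show prefixMaxes m (h :: t) = m :: prefixMaxes (max m h) t from rfl]
    simp only [List.zip_cons_cons, PySem.List.enumerate_cons, List.foldl_cons,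
      List.filterMap_cons]
    by_cases hcmp : h > m
    · simp only [if_pos hcmp]
      have hmem : (row_index, g s) ∉ acc := hacc s le_rfl
      have hadd : PySem.Set.add acc (row_index, g s) = acc ++ [(row_index, g s)] := by
        simp [PySem.Set.add, hmem]
      rw [hadd, max_eq_right (le_of_lt hcmp),
        ih (s + 1) h (acc ++ [(row_index, g s)]) ?_]
      · simp
      · intro i hi hmem2
        rcases List.mem_append.1 hmem2 with h1 | h2
        · exact hacc i (by omega) h1
        · simp only [List.mem_singleton, Prod.mk.injEq] at h2
          have := hg h2.2
          omega
    · simp only [if_neg hcmp]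
      rw [max_eq_left (le_of_not_gt hcmp)]
      exact ih (s + 1) m acc (fun i hi => hacc i (by omega))

-- the filterMap list has no duplicates as a Set: its head components are all row_index and
-- the columns are distinct images of strictly increasing indices; so ofList is the identity
lemma ch_ofList_filterMap (row_index : Int) (g : Int → Int) (hg : Function.Injective g)
    (l : List (Int × Int)) (s : Int) :
    PySem.Set.ofList ((PySem.List.enumerate l s).filterMap
      (fun p => if p.2.1 > p.2.2 then some (row_index, g p.1) else none))
    = (PySem.List.enumerate l s).filterMap
      (fun p => if p.2.1 > p.2.2 then some (row_index, g p.1) else none) := by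
  apply PySem.Set.ofList_eq_self_of_nodup
  have hpw := PySem.List.pairwise_lt_enumerate (xs := l) (s := s)
  have hne : ((PySem.List.enumerate l s).filterMap
      (fun p => if p.2.1 > p.2.2 then some (row_index, g p.1) else none)).Pairwise (· ≠ ·) := by
    refine List.Pairwise.filterMap _ (fun a a' h b hb b' hb' => ?_) hpw
    by_cases c1 : a.2.1 > a.2.2
    · by_cases c2 : a'.2.1 > a'.2.2
      · rw [if_pos c1] at hb; rw [if_pos c2] at hb'
        injection hb with hb; injection hb' with hb'
        subst hb hb'
        intro hbb
        have hgeq : g a.1 = g a'.1 := congrArg Prod.snd hbb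
        have := hg hgeq
        omega
      · rw [if_neg c2] at hb'; cases hb'
    · rw [if_neg c1] at hb; cases hb
  exact hne

-- ===== VERDIC(by name: the statement is the Claim_ definition above) =====
theorem check_horizontally_spec : Claim_equal_check_horizontally := by
  intro heights row_index from_left _
  unfold Spec_check_horizontally check_horizontally check_horizontally_alt
  cases from_left with
  | true =>
    simp only [if_true]
    have hmain := ch_loop_eq row_index (fun i => i) (fun _ _ h => h) heights 0 (-1)
      PySem.Set.empty (by intro i _ h; simp [PySem.Set.empty] at h)
    have hnod := ch_ofList_filterMap row_index (fun i => i) (fun _ _ h => h)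
      (heights.zip (prefixMaxes (-1) heights)) 0
    simp only [PySem.Set.empty, List.nil_append] at hmain ⊢
    rw [hmain, hnod]
  | false =>
    simp only [Bool.false_eq_true, if_false]
    have hmain := ch_loop_eq row_index (fun i => (heights.length : Int) - i - 1)
      (fun a b h => by dsimp at h; omega) heights.reverse 0 (-1)
      PySem.Set.empty (by intro i _ h; simp [PySem.Set.empty] at h)
    have hnod := ch_ofList_filterMap row_index (fun i => (heights.length : Int) - i - 1)
      (fun a b h => by dsimp at h; omega)
      (heights.reverse.zip (prefixMaxes (-1) heights.reverse)) 0
    simp only [PySem.Set.empty, List.nil_append] at hmain ⊢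
    rw [hmain, hnod]
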